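-- pv_equiv track=rewrite | github.com/juani-castore/codigoFacultad | introProgramacion/TP_1/templates/cafetero.py | cafeteros_entre
-- ===== SOURCE A (Python) =====
-- from typing import List
--
-- def filtrar_solo_CAFE(s: str) -> str:
--     '''
--     requiere: nada
--     devuelve: las letras {C,A,F,E} en el mismo orden que aparecen en el argumento
--
--     '''
--     i: int = 0
--     cafe: str = ""
--     #A
--     while(i < len(s)):
--         #B
--         if(s[i] in "CAFE"):
--             cafe = cafe + s[i]
--         i = i + 1
--         #C
--     #D
--     return cafe
--
-- def es_cafetero(n: int) -> bool:
--     """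
--     requiere: n > 0
--     devuelve: un booleano que dice si el numero ingresado es cafetero o no
--     """
--     nroHex: str = hex(n).upper()
--     i: int = 0
--     res: bool = False
--     if("B" in nroHex or "D" in nroHex):
--         res = False
--     elif (filtrar_solo_CAFE(nroHex) == "CAFE"):
--         res = True
--     return res
--
-- def cafeteros_entre(n: int, m: int) -> List[int]:
--     '''
--     requiere: n y m >= 0; n <= m
--     devuelve: una lista de los numeros cafeteros comprendidos entre n y m de manera ordenada de mayor a menor
--     modifica: agrega los numeros cafeteros encontrados entre n y m a listaCafeteros
--     '''
--     listaCafeteros: List[int] = []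
--     i: int = n
--     while (i < m):
--         if(es_cafetero(i) == True):
--            listaCafeteros.append(i)
--         i = i + 1
--     return listaCafeteros
-- ===== SOURCE B (Python) =====
-- def cafeteros_entre(n: int, m: int):
--     # Digit-automaton check: walk |i|'s hex digits least-significant first,
--     # matching the reversed pattern E,F,A,C exactly once, rejecting B/D digits.
--     # No hex string is ever built.
--     pat = (14, 15, 10, 12)  # E, F, A, C
--     def es_cafetero_rapido(i: int) -> bool:
--         t = abs(i)
--         state = 0
--         while t:
--             d = t & 15
--             t >>= 4
--             if d == 11 or d == 13:
--                 return False
--             if d >= 10:  # a CAFE digit (B/D already excluded)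
--                 if state == 4 or d != pat[state]:
--                     return False
--                 state += 1
--         return state == 4
--     return [i for i in range(n, m) if es_cafetero_rapido(i)]
-- ===== Notes on version B (the rewrite author's own statement) =====
-- stated objective: alternative
-- what changed: Instead of building hex(i).upper(), scanning it twice for B/D and filtering the CAFE letters into a new string to compare with "CAFE", B runs a 5-state automaton over the hex digit values of |i| extracted least-significant-first with bit operations (matching the reversed pattern E,F,A,C, early-exiting on B/D or out-of-order digits), never constructing a string; the range loop becomes a comprehension.
import Mathlib
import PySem

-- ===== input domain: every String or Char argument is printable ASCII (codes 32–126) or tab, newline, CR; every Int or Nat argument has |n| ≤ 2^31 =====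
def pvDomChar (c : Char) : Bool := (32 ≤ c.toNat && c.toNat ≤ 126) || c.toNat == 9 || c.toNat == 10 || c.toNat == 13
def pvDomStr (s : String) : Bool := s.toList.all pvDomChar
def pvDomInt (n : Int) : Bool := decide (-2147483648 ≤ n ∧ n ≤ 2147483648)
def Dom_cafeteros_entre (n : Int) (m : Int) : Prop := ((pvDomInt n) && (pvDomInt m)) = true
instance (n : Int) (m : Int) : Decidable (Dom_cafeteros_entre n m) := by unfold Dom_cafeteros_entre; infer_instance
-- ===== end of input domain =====

-- B replaces A's hex-string building/filtering per number by a digit-value automaton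
-- over |i|'s hex digits (least-significant first), an 'alternative' of the same cost.

-- ===== PORT A =====
-- hand-ports of hex(n).upper() pieces, exact over List Char on all ints:
-- Python's hex: optional '-', then '0x', then lowercase hex digits of |n| ('0' for 0);
-- .upper() turns 'x' into 'X' and digits a–f into A–F, so we produce the uppercase form directly.
def pvHexChar (d : Nat) : Char :=
  ['0','1','2','3','4','5','6','7','8','9','A','B','C','D','E','F'].getD d '?'

def pvHexMsb (n : Nat) : List Char :=
  if n = 0 then [] else pvHexMsb (n / 16) ++ [pvHexChar (n % 16)]
decreasing_by exact Nat.div_lt_self (Nat.pos_of_ne_zero (by assumption)) (by omega)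

def pvHexUpper (n : Int) : List Char :=
  (if n < 0 then ['-'] else []) ++ ['0','X'] ++
    (if n.natAbs = 0 then ['0'] else pvHexMsb n.natAbs)

def pvCAFE : List Char := ['C','A','F','E']

-- while loop of filtrar_solo_CAFE: index i, accumulator cafe
def pvFiltLoop (s : List Char) (i : Nat) (cafe : List Char) : List Char :=
  if h : i < s.length then
    pvFiltLoop s (i + 1) (if s[i] ∈ pvCAFE then cafe ++ [s[i]] else cafe)
  else cafe
termination_by s.length - i

def filtrar_solo_CAFE (s : List Char) : List Char := pvFiltLoop s 0 []

def es_cafetero (n : Int) : Bool :=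
  let nroHex : List Char := pvHexUpper n
  let res : Bool := false
  if 'B' ∈ nroHex ∨ 'D' ∈ nroHex then false
  else if filtrar_solo_CAFE nroHex = pvCAFE then true
  else res

-- while loop of cafeteros_entre: i from n to m, appending cafeteros
def pvALoop (i m : Int) (acc : List Int) : List Int :=
  if i < m then pvALoop (i + 1) m (if es_cafetero i = true then acc ++ [i] else acc)
  else acc
termination_by (m - i).toNat
decreasing_by omega

def cafeteros_entre (n : Int) (m : Int) : List Int := pvALoop n m []

-- ===== PORT B =====
def pvPat : List Nat := [14, 15, 10, 12]  -- E, F, A, C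

def pvBLoop (t : Nat) (state : Nat) : Bool :=
  if t ≠ 0 then
    let d := t % 16
    if d = 11 ∨ d = 13 then false
    else if 10 ≤ d then
      if state = 4 ∨ d ≠ pvPat.getD state 0 then false
      else pvBLoop (t / 16) (state + 1)
    else pvBLoop (t / 16) state
  else decide (state = 4)
decreasing_by all_goals exact Nat.div_lt_self (Nat.pos_of_ne_zero (by assumption)) (by omega)

def es_cafetero_rapido (i : Int) : Bool := pvBLoop i.natAbs 0

def cafeteros_entre_alt (n : Int) (m : Int) : List Int :=
  (PySem.List.pyRange n m 1).filter es_cafetero_rapido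

-- ===== PRECONDITION & SPEC =====
def Spec_cafeteros_entre (n : Int) (m : Int) (out : List Int) : Prop := out = cafeteros_entre_alt n m
instance (n : Int) (m : Int) (out : List Int) : Decidable (Spec_cafeteros_entre n m out) := by unfold Spec_cafeteros_entre; infer_instance

-- ===== CLAIM (what is proved, stated in full; the proofs are below) =====
def Claim_equal_cafeteros_entre : Prop := ∀ (n : Int) (m : Int), Dom_cafeteros_entre n m → Spec_cafeteros_entre n m (cafeteros_entre n m)

-- ===== LEMMAS AND PROOFS =====

-- digit-value views of a number
def pvMsbVals (n : Nat) : List Nat :=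
  if n = 0 then [] else pvMsbVals (n / 16) ++ [n % 16]
decreasing_by exact Nat.div_lt_self (Nat.pos_of_ne_zero (by assumption)) (by omega)

def pvLsbVals (n : Nat) : List Nat :=
  if n = 0 then [] else n % 16 :: pvLsbVals (n / 16)
decreasing_by exact Nat.div_lt_self (Nat.pos_of_ne_zero (by assumption)) (by omega)

def pvIsCafeV (d : Nat) : Bool := decide (10 ≤ d ∧ d ≠ 11 ∧ d ≠ 13)

-- automaton as a list function
def pvBList (l : List Nat) (state : Nat) : Bool :=
  match l with
  | [] => decide (state = 4)
  | d :: r =>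
    if d = 11 ∨ d = 13 then false
    else if 10 ≤ d then
      if state = 4 ∨ d ≠ pvPat.getD state 0 then false
      else pvBList r (state + 1)
    else pvBList r state

lemma pvBLoop_eq_list (t state : Nat) : pvBLoop t state = pvBList (pvLsbVals t) state := by
  induction t using Nat.strong_induction_on generalizing state with
  | _ t ih =>
    rw [pvBLoop, pvLsbVals]
    by_cases h0 : t = 0
    · simp [h0, pvBList]
    · have hlt : t / 16 < t := Nat.div_lt_self (Nat.pos_of_ne_zero h0) (by omega)
      simp only [h0, if_neg, if_pos, ne_eq, not_false_eq_true, pvBList]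
      split_ifs <;> simp_all [ih _ hlt]

lemma pvLsb_eq_rev_msb (n : Nat) : pvLsbVals n = (pvMsbVals n).reverse := by
  induction n using Nat.strong_induction_on with
  | _ n ih =>
    rw [pvLsbVals, pvMsbVals]
    by_cases h0 : n = 0
    · simp [h0]
    · have hlt : n / 16 < n := Nat.div_lt_self (Nat.pos_of_ne_zero h0) (by omega)
      simp [h0, ih _ hlt]

lemma pvMsb_lt16 (n : Nat) : ∀ d ∈ pvMsbVals n, d < 16 := by
  induction n using Nat.strong_induction_on with
  | _ n ih =>
    rw [pvMsbVals]
    by_cases h0 : n = 0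
    · simp [h0]
    · have hlt : n / 16 < n := Nat.div_lt_self (Nat.pos_of_ne_zero h0) (by omega)
      simp only [h0, if_neg, not_false_eq_true, List.mem_append, List.mem_singleton]
      rintro d (hd | rfl)
      · exact ih _ hlt d hd
      · omega

-- automaton characterization on lists
lemma pvBList_char (l : List Nat) (state : Nat) (hs : state ≤ 4) :
    pvBList l state =
      decide (11 ∉ l ∧ 13 ∉ l ∧ l.filter pvIsCafeV = pvPat.drop state) := by
  induction l generalizing state with
  | nil => interval_cases state <;> decide
  | cons d r ih =>
    simp only [pvBList]
    by_cases hbd : d = 11 ∨ d = 13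
    · simp only [hbd, if_pos]
      rcases hbd with rfl | rfl <;> simp
    · rw [if_neg hbd]
      by_cases hc : 10 ≤ d
      · rw [if_pos hc]
        have hcv : pvIsCafeV d = true := by simp [pvIsCafeV]; omega
        by_cases hfail : state = 4 ∨ d ≠ pvPat.getD state 0
        · rw [if_pos hfail]
          symm; simp only [decide_eq_false_iff_not, not_and]
          intro _ _ hfilt
          have : (d :: r).filter pvIsCafeV = d :: r.filter pvIsCafeV := by
            simp [hcv]
          rw [this] at hfilt
          rcases hfail with h4 | hne
          · subst h4; simp [pvPat] at hfilt
          · apply hne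
            interval_cases state <;> first | omega | simp_all [pvPat]
        · rw [if_neg hfail]
          rw [not_or, not_ne_iff] at hfail
          obtain ⟨h4, heq⟩ := hfail
          have hs' : state + 1 ≤ 4 := by omega
          rw [ih (state + 1) hs']
          simp only [decide_eq_decide]
          have hfe : (d :: r).filter pvIsCafeV = d :: r.filter pvIsCafeV := by simp [hcv]
          rw [hfe]
          have hdrop : pvPat.drop state = d :: pvPat.drop (state + 1) := by
            subst heq; interval_cases state <;> first | omega | decide
          rw [hdrop]
          constructor
          · rintro ⟨a, b, c⟩
            exact ⟨by simp [a]; omega, by simp [b]; omega, by rw [c]⟩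
          · rintro ⟨a, b, c⟩
            refine ⟨by simp at a ⊢; tauto, by simp at b ⊢; tauto, by simpa using c⟩
      · rw [if_neg hc]
        rw [ih state hs]
        have hcv : pvIsCafeV d = false := by simp [pvIsCafeV]; omega
        have hd11 : (11 : Nat) ≠ d := by omega
        have hd13 : (13 : Nat) ≠ d := by omega
        have h11 : ((11 : Nat) ∈ d :: r) ↔ 11 ∈ r := by
          rw [List.mem_cons]; simp [hd11]
        have h13 : ((13 : Nat) ∈ d :: r) ↔ 13 ∈ r := by
          rw [List.mem_cons]; simp [hd13]
        simp only [decide_eq_decide, List.filter_cons, hcv, Bool.false_eq_true, if_false]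
        rw [h11, h13]

-- A's filter loop computes List.filter
lemma pvFiltLoop_eq (s : List Char) (i : Nat) (cafe : List Char) :
    pvFiltLoop s i cafe = cafe ++ (s.drop i).filter (· ∈ pvCAFE) := by
  induction hn : s.length - i using Nat.strong_induction_on generalizing i cafe with
  | _ n ih =>
    rw [pvFiltLoop]
    by_cases h : i < s.length
    · have hdrop : s.drop i = s[i] :: s.drop (i + 1) := List.drop_eq_getElem_cons h
      rw [dif_pos h, ih (s.length - (i + 1)) (by omega) (i + 1) _ rfl, hdrop,
        List.filter_cons]
      by_cases hm : s[i] ∈ pvCAFE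
      · simp only [hm, decide_true, if_true, List.append_assoc, List.singleton_append]
      · simp only [hm, decide_false, Bool.false_eq_true, if_false]
    · rw [dif_neg h]
      rw [List.drop_eq_nil_of_le (by omega)]
      simp

-- hex chars are the mapped digit values
lemma pvHexMsb_eq_map (n : Nat) : pvHexMsb n = (pvMsbVals n).map pvHexChar := by
  induction n using Nat.strong_induction_on with
  | _ n ih =>
    rw [pvHexMsb, pvMsbVals]
    by_cases h0 : n = 0
    · simp [h0]
    · have hlt : n / 16 < n := Nat.div_lt_self (Nat.pos_of_ne_zero h0) (by omega)
      simp [h0, ih _ hlt]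

-- facts about pvHexChar on digits < 16
lemma pvHexChar_facts (d : Nat) (hd : d < 16) :
    (pvHexChar d = 'B' ↔ d = 11) ∧ (pvHexChar d = 'D' ↔ d = 13) ∧
    ((pvHexChar d ∈ pvCAFE) ↔ pvIsCafeV d = true) ∧
    (pvHexChar d = 'C' ↔ d = 12) ∧ (pvHexChar d = 'A' ↔ d = 10) ∧
    (pvHexChar d = 'F' ↔ d = 15) ∧ (pvHexChar d = 'E' ↔ d = 14) := by
  interval_cases d <;> refine ⟨by decide, by decide, by decide, by decide, by decide, by decide, by decide⟩

lemma pvMap_eq_CAFE (l : List Nat) (h16 : ∀ d ∈ l, d < 16) :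
    (l.map pvHexChar = pvCAFE ↔ l = [12, 10, 15, 14]) := by
  constructor
  · intro he
    rcases l with _ | ⟨a, l⟩; · simp [pvCAFE] at he
    rcases l with _ | ⟨b, l⟩; · simp [pvCAFE] at he
    rcases l with _ | ⟨c, l⟩; · simp [pvCAFE] at he
    rcases l with _ | ⟨d, l⟩; · simp [pvCAFE] at he
    rcases l with _ | ⟨e, l⟩
    swap; · simp [pvCAFE] at he
    simp only [List.map, pvCAFE, List.cons.injEq, and_true] at he
    obtain ⟨h1, h2, h3, h4⟩ := he
    have ha := (pvHexChar_facts a (h16 a (by simp))).2.2.2.1.mp h1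
    have hb := (pvHexChar_facts b (h16 b (by simp))).2.2.2.2.1.mp h2
    have hc := (pvHexChar_facts c (h16 c (by simp))).2.2.2.2.2.1.mp h3
    have hd := (pvHexChar_facts d (h16 d (by simp))).2.2.2.2.2.2.mp h4
    simp [ha, hb, hc, hd]
  · rintro rfl; decide

lemma pvExists_iff (x : Nat) (c : Char)
    (hc : ∀ d, d < 16 → (pvHexChar d = c ↔ d = x)) (l : List Nat)
    (h16 : ∀ d ∈ l, d < 16) : (∃ a ∈ l, pvHexChar a = c) ↔ x ∈ l := by
  constructor
  · rintro ⟨a, ha, he⟩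
    have := (hc a (h16 a ha)).mp he
    subst this; exact ha
  · intro hx
    exact ⟨x, hx, (hc x (h16 x hx)).mpr rfl⟩

-- per-number equivalence
lemma pvPerNum (n : Int) : es_cafetero n = es_cafetero_rapido n := by
  rw [es_cafetero_rapido, pvBLoop_eq_list, pvLsb_eq_rev_msb, pvBList_char _ 0 (by omega)]
  simp only [es_cafetero, filtrar_solo_CAFE, pvFiltLoop_eq, pvHexUpper,
    List.drop_zero, List.nil_append, List.mem_reverse, List.filter_reverse,
    pvPat]
  set v := pvMsbVals n.natAbs with hv
  have h16 : ∀ d ∈ v, d < 16 := pvMsb_lt16 n.natAbs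
  by_cases h0 : n.natAbs = 0
  · have hv0 : v = [] := by rw [hv, pvMsbVals]; simp [h0]
    by_cases hneg : n < 0 <;> simp [h0, hv0, hneg] <;> decide
  · have hdig : (if n.natAbs = 0 then ['0'] else pvHexMsb n.natAbs) = v.map pvHexChar := by
      rw [if_neg h0, pvHexMsb_eq_map, hv]
    have hmemB : ('B' ∈ (if n < 0 then ['-'] else []) ++ ['0','X'] ++ v.map pvHexChar)
        ↔ 11 ∈ v := by
      split_ifs <;> simp <;>
        exact pvExists_iff 11 'B' (fun d hd => (pvHexChar_facts d hd).1) v h16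
    have hmemD : ('D' ∈ (if n < 0 then ['-'] else []) ++ ['0','X'] ++ v.map pvHexChar)
        ↔ 13 ∈ v := by
      split_ifs <;> simp <;>
        exact pvExists_iff 13 'D' (fun d hd => (pvHexChar_facts d hd).2.1) v h16
    have hfilt : ((if n < 0 then ['-'] else []) ++ ['0','X'] ++ v.map pvHexChar).filter
        (· ∈ pvCAFE) = (v.filter pvIsCafeV).map pvHexChar := by
      rw [List.filter_append, List.filter_append]
      have hpre : ((if n < 0 then ['-'] else []) : List Char).filter (· ∈ pvCAFE) = [] := by
        split_ifs <;> decide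
      rw [hpre, show (['0','X'] : List Char).filter (· ∈ pvCAFE) = [] from rfl]
      simp only [List.nil_append]
      rw [List.filter_map]
      congr 1
      apply List.filter_congr
      intro d hd
      have hiff := (pvHexChar_facts d (h16 d hd)).2.2.1
      simp only [Function.comp_apply]
      cases hcv : pvIsCafeV d
      · simp only [hcv] at hiff
        simp [hiff]
      · simp only [hcv] at hiff
        simp [hiff]
    have hmap := pvMap_eq_CAFE (v.filter pvIsCafeV)
      (fun d hd => h16 d (List.mem_of_mem_filter hd))
    simp only [hdig, hmemB, hmemD, hfilt]
    by_cases h1 : 11 ∈ v ∨ 13 ∈ v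
    · rw [if_pos h1]
      symm
      simp only [decide_eq_false_iff_not, not_and]
      intro hn11 hn13 _
      rcases h1 with h | h
      · exact hn11 h
      · exact hn13 h
    · rw [if_neg h1]
      rw [not_or] at h1
      by_cases h2 : (v.filter pvIsCafeV).map pvHexChar = pvCAFE
      · rw [if_pos h2]
        symm
        simp only [decide_eq_true_eq]
        refine ⟨h1.1, h1.2, ?_⟩
        rw [hmap.mp h2]
        decide
      · rw [if_neg h2]
        symm
        simp only [decide_eq_false_iff_not, not_and]
        intro _ _ hc
        have hcf : List.filter pvIsCafeV v = [12, 10, 15, 14] := by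
          have := congrArg List.reverse hc
          simpa using this
        exact h2 (hmap.mpr hcf)

-- A's main loop is filter over the range
lemma pvALoop_eq (i m : Int) (acc : List Int) :
    pvALoop i m acc = acc ++ (PySem.List.pyRange i m 1).filter es_cafetero := by
  induction hn : (m - i).toNat using Nat.strong_induction_on generalizing i acc with
  | _ n ih =>
    rw [pvALoop]
    by_cases h : i < m
    · rw [if_pos h, PySem.List.pyRange_one_cons h,
        ih ((m - (i + 1)).toNat) (by omega) (i + 1) _ rfl, List.filter_cons]
      by_cases hc : es_cafetero i = true <;> simp [hc]
    · rw [if_neg h]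
      rw [show PySem.List.pyRange i m 1 = [] from by
        simp [PySem.List.pyRange]; omega]
      simp

-- ===== VERDICT (by name: the statement is the Claim_ definition above) =====
theorem cafeteros_entre_spec : Claim_equal_cafeteros_entre := by
  intro n m _
  unfold Spec_cafeteros_entre cafeteros_entre cafeteros_entre_alt
  rw [pvALoop_eq]
  simp only [List.nil_append]
  exact List.filter_congr (fun i _ => pvPerNum i)
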